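-- pv_equiv track=rewrite | github.com/xph9876/RNARepair | extractUtils.py | merge_parts
-- ===== SOURCE A (Python) =====
-- from collections import defaultdict
--
-- def merge_parts(middles):
--     aligns = {}
--     out = defaultdict(int)
--     for k in sorted(middles.keys(), key=lambda x: middles[x]):
--         seq = k.replace('-','')
--         if seq not in aligns:
--             aligns[seq] = k
--         out[aligns[seq]] += middles[k]
--     return out
-- ===== SOURCE B (Python) =====
-- def merge_parts(middles):
--     # Alternative algorithm: sort the items once, then repeatedly peel the first
--     # remaining item off as its group's representative and sum/remove its whole
--     # dash-stripped group by partition.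
--     items = sorted(middles.items(), key=lambda kv: kv[1])
--     out = []
--     while items:
--         k, v = items[0]
--         seq = k.replace('-', '')
--         same = sum(w for (k2, w) in items[1:] if k2.replace('-', '') == seq)
--         items = [(k2, w) for (k2, w) in items[1:] if k2.replace('-', '') != seq]
--         out.append((k, v + same))
--     return dict(out)
-- ===== Notes on version B (the rewrite author's own statement) =====
-- stated objective: alternative
-- what changed: A fuses grouping with accumulation in one dict-driven loop (aligns map + defaultdict) over the value-sorted keys; B instead sorts the items once and then recursively peels the first remaining item off as its group's representative, summing and removing its whole dash-stripped group by partition, with no dictionaries during the scan.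
import Mathlib
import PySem

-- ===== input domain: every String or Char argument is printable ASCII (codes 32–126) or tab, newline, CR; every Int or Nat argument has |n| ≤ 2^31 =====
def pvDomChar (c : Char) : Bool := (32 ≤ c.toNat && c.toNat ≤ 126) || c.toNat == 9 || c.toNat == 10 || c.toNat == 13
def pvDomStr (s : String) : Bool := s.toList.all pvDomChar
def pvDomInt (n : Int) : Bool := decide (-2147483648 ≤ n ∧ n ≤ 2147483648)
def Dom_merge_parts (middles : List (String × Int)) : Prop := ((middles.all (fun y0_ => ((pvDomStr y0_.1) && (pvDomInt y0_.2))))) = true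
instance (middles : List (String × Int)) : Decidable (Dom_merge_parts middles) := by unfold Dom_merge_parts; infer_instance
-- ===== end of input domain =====

-- B replaces A's fused dict-driven loop (aligns map + defaultdict over value-sorted keys) by
-- sort-once followed by recursive extraction: peel the first remaining item off as its group's
-- representative and sum/remove its whole dash-stripped group by partition (objective: alternative).

-- ===== PORT A =====
def merge_parts (middles : List (String × Int)) : List (String × Int) :=
  let d : PySem.Dict String Int := PySem.Dict.mk middles
  let st := (PySem.List.sorted d.keys (fun x => d.getD x 0)).foldl
    (fun (st : PySem.Dict String String × PySem.Dict String Int) k =>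
      let seq := PySem.Str.replace k "-" ""
      let aligns := if st.1.contains seq then st.1 else st.1.insert seq k
      let rep := aligns.getD seq k
      (aligns, st.2.insert rep (st.2.getD rep 0 + d.getD k 0)))
    (PySem.Dict.empty, PySem.Dict.empty)
  st.2.items

-- ===== PORT B =====
-- helpers: k.replace('-',''), the generator-sum over the same-group tail, and the partition
def stripD (k : String) : String := PySem.Str.replace k "-" ""
def sameSum (seq : String) (s : List (String × Int)) : Int :=
  ((s.filter (fun p => stripD p.1 == seq)).map (fun p => p.2)).sum
def filterOut (seq : String) (s : List (String × Int)) : List (String × Int) :=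
  s.filter (fun p => !(stripD p.1 == seq))

def mergeBuild : List (String × Int) → List (String × Int)
  | [] => []
  | (k, v) :: rest =>
    let seq := stripD k
    (k, v + sameSum seq rest) :: mergeBuild (filterOut seq rest)
termination_by l => l.length
decreasing_by simp only [filterOut]; exact Nat.lt_succ_of_le (List.length_filter_le _ _)

-- mergeBuild is Source B's peel loop ('while items: take head, sum its group, keep the rest'),
-- written as the structural recursion it performs; Source B returns dict(out), and under Pre_ the
-- peeled pairs have distinct keys, so that dict IS the association list the loop produces.
def merge_parts_alt (middles : List (String × Int)) : List (String × Int) :=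
  mergeBuild (PySem.List.sorted middles (fun p => p.2))

-- ===== PRECONDITION & SPEC =====
-- Pre_ only restates that the argument is a valid Python dict: a Python dict cannot carry
-- duplicate keys, so no input A actually receives is excluded.
def Pre_merge_parts (middles : List (String × Int)) : Prop := (middles.map Prod.fst).Nodup
instance (middles : List (String × Int)) : Decidable (Pre_merge_parts middles) := by unfold Pre_merge_parts; infer_instance
def pvWitness_merge_parts : (List (String × Int)) := [("a-b", 2), ("ab", 1), ("c-", 5)]

def Spec_merge_parts (middles : List (String × Int)) (out : List (String × Int)) : Prop := out = merge_parts_alt middles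
instance (middles : List (String × Int)) (out : List (String × Int)) : Decidable (Spec_merge_parts middles out) := by unfold Spec_merge_parts; infer_instance

-- ===== CLAIM (what is proved, stated in full; the proofs are below) =====
def Claim_equal_merge_parts : Prop := ∀ (middles : List (String × Int)), Dom_merge_parts middles → Pre_merge_parts middles → Spec_merge_parts middles (merge_parts middles)

-- ===== LEMMAS AND PROOFS =====

-- the pair-level step of A's loop (A's step after the key-lookups are replaced by the pair values)
def stepP (st : PySem.Dict String String × PySem.Dict String Int) (p : String × Int) :
    PySem.Dict String String × PySem.Dict String Int :=
  let seq := stripD p.1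
  let aligns := if st.1.contains seq then st.1 else st.1.insert seq p.1
  (aligns, st.2.insert (aligns.getD seq p.1) (st.2.getD (aligns.getD seq p.1) 0 + p.2))

-- ---- generic sort lemmas ----

theorem sorted_map_congr {α β κ : Type} [LT κ] [DecidableLT κ]
    (l : List α) (f : α → β) (keyB : β → κ) (keyA : α → κ)
    (h : ∀ a ∈ l, keyB (f a) = keyA a) :
    PySem.List.sorted (l.map f) keyB = (PySem.List.sorted l keyA).map f := by
  rw [PySem.List.sorted_eq_foldl_insertBy, PySem.List.sorted_eq_foldl_insertBy, List.foldl_map]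
  -- generalize the accumulator
  suffices H : ∀ (l' : List α) (acc : List α),
      (∀ a ∈ l', keyB (f a) = keyA a) → (∀ a ∈ acc, keyB (f a) = keyA a) →
      l'.foldl (fun m a => PySem.List.insertBy (fun a b => decide (keyB a < keyB b)) (f a) m) (acc.map f)
        = (l'.foldl (fun m a => PySem.List.insertBy (fun a b => decide (keyA a < keyA b)) a m) acc).map f by
    simpa using H l [] h (by simp)
  intro l' ; induction l' with
  | nil => intro acc _ _; simp
  | cons a l' ih =>
    intro acc hl hacc
    simp only [List.foldl_cons]
    have hins : PySem.List.insertBy (fun a b => decide (keyB a < keyB b)) (f a) (acc.map f)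
        = (PySem.List.insertBy (fun a b => decide (keyA a < keyA b)) a acc).map f := by
      -- congruence version: elements compared are a and members of acc
      clear ih
      induction acc with
      | nil => simp [PySem.List.insertBy]
      | cons y ys ihy =>
        have hy : keyB (f y) = keyA y := hacc y (by simp)
        have ha : keyB (f a) = keyA a := hl a (by simp)
        simp only [List.map_cons, PySem.List.insertBy, hy, ha]
        by_cases hb : decide (keyA a < keyA y) = true
        · simp [hb]
        · simp only [hb, if_neg]
          rw [ihy (fun z hz => hacc z (by simp [hz]))]
          simp [hb]
    rw [hins]
    exact ih _ (fun z hz => hl z (by simp [hz]))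
      (fun z hz => by
        rcases (PySem.List.mem_insertBy _ a z acc).mp hz with h1 | h2
        · exact h1 ▸ hl a (by simp)
        · exact hacc z h2)

-- ---- dict lemmas ----

theorem insert_getD_self_of_contains {ν : Type} (d : PySem.Dict String ν) (k : String) (v0 : ν)
    (hnd : d.keys.Nodup) (hc : d.contains k = true) : d.insert k (d.getD k v0) = d := by
  apply PySem.Dict.ext
  rw [PySem.Dict.items_insert_of_contains _ _ hc]
  conv_rhs => rw [← List.map_id d.items]
  apply List.map_congr_left
  intro p hp
  by_cases hk : p.1 == k
  · have hk' : p.1 = k := by simpa using hk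
    have : d.getD p.1 v0 = p.2 := PySem.Dict.getD_of_mem_items d (by simpa using hp) hnd v0
    simp [hk, ← hk', this]
  · simp [hk]

theorem insert_comm_of_contains {ν : Type} (d : PySem.Dict String ν) (k r : String) (t x : ν)
    (hne : k ≠ r) (hc : d.contains k = true) :
    (d.insert r x).insert k t = (d.insert k t).insert r x := by
  have hbne : (k == r) = false := by simpa using hne
  have hbne' : (r == k) = false := by simpa using (Ne.symm hne)
  have hck : (d.insert r x).contains k = true := by
    rw [PySem.Dict.contains_insert]; simp [hc]
  cases hr : d.contains r with
  | true =>
    have hrk : (d.insert k t).contains r = true := by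
      rw [PySem.Dict.contains_insert]; simp [hr]
    apply PySem.Dict.ext
    rw [PySem.Dict.items_insert_of_contains _ _ hck,
        PySem.Dict.items_insert_of_contains _ _ hrk,
        PySem.Dict.items_insert_of_contains _ _ hr,
        PySem.Dict.items_insert_of_contains _ _ hc,
        List.map_map, List.map_map]
    apply List.map_congr_left
    intro p _
    by_cases h1 : p.1 == r <;> by_cases h2 : p.1 == k <;>
      simp_all [Function.comp, hbne, hbne']
  | false =>
    have hrk : (d.insert k t).contains r = false := by
      rw [PySem.Dict.contains_insert]; simp [hr, hbne']
    apply PySem.Dict.ext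
    rw [PySem.Dict.items_insert_of_contains _ _ hck,
        PySem.Dict.items_insert_of_not_contains _ _ hrk,
        PySem.Dict.items_insert_of_not_contains _ _ hr,
        PySem.Dict.items_insert_of_contains _ _ hc,
        List.map_append]
    simp [hbne']
    exact fun h => absurd h (Ne.symm hne)

theorem mk_append_insert {ν : Type} (o₀ l : List (String × ν)) (r : String) (x : ν)
    (hr : r ∉ o₀.map Prod.fst) :
    (PySem.Dict.mk (o₀ ++ l)).insert r x = PySem.Dict.mk (o₀ ++ ((PySem.Dict.mk l).insert r x).items) := by
  have ho : ∀ p ∈ o₀, (p.1 == r) = false := by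
    intro p hp
    exact beq_eq_false_iff_ne.mpr (fun h => hr (h ▸ List.mem_map_of_mem hp))
  have hcon : (PySem.Dict.mk (o₀ ++ l)).contains r = (PySem.Dict.mk l).contains r := by
    simp only [PySem.Dict.contains, PySem.Dict.items, List.any_append]
    have : o₀.any (fun p => p.1 == r) = false := by
      simp only [List.any_eq_false]; intro p hp; simp [ho p hp]
    simp [this]
  cases hc : (PySem.Dict.mk l).contains r with
  | true =>
    apply PySem.Dict.ext
    rw [PySem.Dict.items_insert_of_contains _ _ (hcon.trans hc),
        PySem.Dict.items_insert_of_contains _ _ hc]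
    simp only [PySem.Dict.items, List.map_append]
    congr 1
    conv_rhs => rw [← List.map_id o₀]
    apply List.map_congr_left
    intro p hp; simp [ho p hp]
  | false =>
    apply PySem.Dict.ext
    rw [PySem.Dict.items_insert_of_not_contains _ _ (hcon.trans hc),
        PySem.Dict.items_insert_of_not_contains _ _ hc]
    simp [PySem.Dict.items]

theorem mk_append_getD {ν : Type} (o₀ l : List (String × ν)) (r : String) (v0 : ν)
    (hr : r ∉ o₀.map Prod.fst) :
    (PySem.Dict.mk (o₀ ++ l)).getD r v0 = (PySem.Dict.mk l).getD r v0 := by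
  have ho : ∀ p ∈ o₀, (p.1 == r) = false := by
    intro p hp
    exact beq_eq_false_iff_ne.mpr (fun h => hr (h ▸ List.mem_map_of_mem hp))
  simp only [PySem.Dict.getD, PySem.Dict.get?, PySem.Dict.items, List.find?_append]
  have : o₀.find? (fun p => p.1 == r) = none := by
    rw [List.find?_eq_none]; intro p hp; simp [ho p hp]
  simp [this]

-- ---- the three loop lemmas ----
-- M: once seq has representative k (present in out), the future seq-group contributions can be
-- added in one stroke and the seq-elements removed from the remaining traversal.
theorem fold_absorb (s : List (String × Int)) (a : PySem.Dict String String)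
    (o : PySem.Dict String Int) (seq k : String)
    (hIa : ∀ p ∈ a.items, stripD p.2 = p.1) (hget : a.get? seq = some k)
    (hko : o.contains k = true) (hnd : o.keys.Nodup) :
    s.foldl stepP (a, o) =
      (filterOut seq s).foldl stepP (a, o.insert k (o.getD k 0 + sameSum seq s)) := by
  induction s generalizing a o with
  | nil =>
    have h0 : sameSum seq [] = 0 := by simp [sameSum]
    rw [List.foldl_nil, h0, add_zero, insert_getD_self_of_contains o k 0 hnd hko]
    simp [filterOut]
  | cons p rest ih =>
    obtain ⟨k2, v2⟩ := p
    have hks : stripD k = seq := hIa (seq, k) (PySem.Dict.mem_items_of_get?_eq_some a hget)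
    by_cases h2 : stripD k2 = seq
    · have hca : a.contains (stripD k2) = true := by
        rw [h2, PySem.Dict.contains_eq_isSome_get?, hget]; rfl
      have hrep : a.getD (stripD k2) k2 = k := by
        rw [h2]; exact PySem.Dict.getD_of_get?_eq_some a k2 hget
      have hstep : stepP (a, o) (k2, v2) = (a, o.insert k (o.getD k 0 + v2)) := by
        simp [stepP, hca, hrep]
      have hf : filterOut seq ((k2, v2) :: rest) = filterOut seq rest := by
        simp [filterOut, h2]
      have hsm : sameSum seq ((k2, v2) :: rest) = v2 + sameSum seq rest := by
        simp [sameSum, h2]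
      rw [List.foldl_cons, hstep,
          ih a _ hIa hget (PySem.Dict.contains_insert_self o k _)
            (PySem.Dict.nodup_keys_insert o k _ hnd),
          PySem.Dict.getD_insert_self, PySem.Dict.insert_insert_self, hf, hsm, add_assoc]
    · have hk2k : k2 ≠ k := fun h => h2 (by rw [h, hks])
      have hf : filterOut seq ((k2, v2) :: rest) = (k2, v2) :: filterOut seq rest := by
        simp [filterOut, h2]
      have hsm : sameSum seq ((k2, v2) :: rest) = sameSum seq rest := by
        simp [sameSum, h2]
      by_cases hca : a.contains (stripD k2) = true
      · obtain ⟨rv, hrv⟩ : ∃ rv, a.get? (stripD k2) = some rv := by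
          rw [PySem.Dict.contains_eq_isSome_get?] at hca
          exact Option.isSome_iff_exists.mp hca
        have hrvstrip : stripD rv = stripD k2 :=
          hIa (stripD k2, rv) (PySem.Dict.mem_items_of_get?_eq_some a hrv)
        have hkrv : k ≠ rv := fun h => h2 (by rw [← hrvstrip, ← h, hks])
        have hrep : a.getD (stripD k2) k2 = rv := PySem.Dict.getD_of_get?_eq_some a k2 hrv
        have hstep : ∀ oo : PySem.Dict String Int,
            stepP (a, oo) (k2, v2) = (a, oo.insert rv (oo.getD rv 0 + v2)) := by
          intro oo; simp [stepP, hca, hrep]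
        rw [List.foldl_cons, hstep,
            ih a _ hIa hget
              (by rw [PySem.Dict.contains_insert]; simp [hko])
              (PySem.Dict.nodup_keys_insert o rv _ hnd),
            hf, hsm, List.foldl_cons, hstep]
        rw [PySem.Dict.getD_insert_of_ne o _ _ hkrv,
            insert_comm_of_contains o k rv _ _ hkrv hko,
            PySem.Dict.getD_insert_of_ne o _ _ (Ne.symm hkrv)]
      · have hca' : a.contains (stripD k2) = false := by simpa using hca
        have hIa' : ∀ p ∈ (a.insert (stripD k2) k2).items, stripD p.2 = p.1 := by
          intro p hp
          rcases (PySem.Dict.mem_items_insert a _ _ p).mp hp with h | ⟨hpa, _⟩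
          · rw [h]
          · exact hIa p hpa
        have hget' : (a.insert (stripD k2) k2).get? seq = some k := by
          rw [PySem.Dict.get?_insert_of_ne a _ (Ne.symm h2)]; exact hget
        have hrep : (a.insert (stripD k2) k2).getD (stripD k2) k2 = k2 :=
          PySem.Dict.getD_insert_self a _ _ _
        have hstep : ∀ oo : PySem.Dict String Int,
            stepP (a, oo) (k2, v2) = (a.insert (stripD k2) k2, oo.insert k2 (oo.getD k2 0 + v2)) := by
          intro oo; simp [stepP, hca', hrep]
        rw [List.foldl_cons, hstep,
            ih _ _ hIa' hget'
              (by rw [PySem.Dict.contains_insert]; simp [hko])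
              (PySem.Dict.nodup_keys_insert o k2 _ hnd),
            hf, hsm, List.foldl_cons, hstep]
        rw [PySem.Dict.getD_insert_of_ne o _ _ (Ne.symm hk2k),
            insert_comm_of_contains o k k2 _ _ (Ne.symm hk2k) hko,
            PySem.Dict.getD_insert_of_ne o _ _ hk2k]

-- N: an aligns entry whose seq never occurs in the rest of the traversal is inert.
theorem fold_drop_align (s : List (String × Int)) (a : PySem.Dict String String)
    (o : PySem.Dict String Int) (seq k : String)
    (hs : ∀ p ∈ s, ¬(stripD p.1 = seq)) :
    s.foldl stepP (PySem.Dict.mk ((seq, k) :: a.items), o) =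
      (PySem.Dict.mk ((seq, k) :: (s.foldl stepP (a, o)).1.items), (s.foldl stepP (a, o)).2) := by
  induction s generalizing a o with
  | nil => rfl
  | cons p rest ih =>
    obtain ⟨k2, v2⟩ := p
    have hne : ¬(stripD k2 = seq) := hs (k2, v2) (by simp)
    have hb : (seq == stripD k2) = false := by simpa using (Ne.symm hne)
    have hcon : (PySem.Dict.mk ((seq, k) :: a.items)).contains (stripD k2)
        = a.contains (stripD k2) := by
      simp [PySem.Dict.contains, hb]
    have hget : ∀ (v : String), (PySem.Dict.mk ((seq, k) :: a.items)).getD (stripD k2) v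
        = a.getD (stripD k2) v := by
      intro v
      rw [PySem.Dict.getD_eq_get?_getD, PySem.Dict.get?_mk_cons, PySem.Dict.getD_eq_get?_getD]
      simp [hb]
    cases hca : a.contains (stripD k2) with
    | true =>
      have hstep1 : stepP (PySem.Dict.mk ((seq, k) :: a.items), o) (k2, v2)
          = (PySem.Dict.mk ((seq, k) :: a.items),
             o.insert (a.getD (stripD k2) k2) (o.getD (a.getD (stripD k2) k2) 0 + v2)) := by
        simp [stepP, hcon, hca, hget]
      have hstep2 : stepP (a, o) (k2, v2)
          = (a, o.insert (a.getD (stripD k2) k2) (o.getD (a.getD (stripD k2) k2) 0 + v2)) := by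
        simp [stepP, hca]
      rw [List.foldl_cons, List.foldl_cons, hstep1, hstep2]
      exact ih _ _ (fun q hq => hs q (by simp [hq]))
    | false =>
      have hca2 : (PySem.Dict.mk ((seq, k) :: a.items)).contains (stripD k2) = false := by
        rw [hcon]; exact hca
      have hins : (PySem.Dict.mk ((seq, k) :: a.items)).insert (stripD k2) k2
          = PySem.Dict.mk ((seq, k) :: (a.insert (stripD k2) k2).items) := by
        apply PySem.Dict.ext
        rw [PySem.Dict.items_insert_of_not_contains _ _ hca2,
            PySem.Dict.items_insert_of_not_contains _ _ hca]
        simp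
      have hget2 : ∀ (b : PySem.Dict String String) (v : String),
          (PySem.Dict.mk ((seq, k) :: b.items)).getD (stripD k2) v
          = b.getD (stripD k2) v := by
        intro b v
        rw [PySem.Dict.getD_eq_get?_getD, PySem.Dict.get?_mk_cons, PySem.Dict.getD_eq_get?_getD]
        simp [hb]
      have hstep1 : stepP (PySem.Dict.mk ((seq, k) :: a.items), o) (k2, v2)
          = (PySem.Dict.mk ((seq, k) :: (a.insert (stripD k2) k2).items),
             o.insert k2 (o.getD k2 0 + v2)) := by
        simp only [stepP, hca2, if_neg, Bool.false_eq_true, if_false, hins, hget2,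
          PySem.Dict.getD_insert_self]
      have hstep2 : stepP (a, o) (k2, v2)
          = (a.insert (stripD k2) k2, o.insert k2 (o.getD k2 0 + v2)) := by
        simp only [stepP, hca, Bool.false_eq_true, if_false, PySem.Dict.getD_insert_self]
      rw [List.foldl_cons, List.foldl_cons, hstep1, hstep2]
      exact ih _ _ (fun q hq => hs q (by simp [hq]))

-- P: a finished out-prefix whose keys the remaining loop never touches stays a prefix.
theorem fold_out_prefix (s : List (String × Int)) (a : PySem.Dict String String)
    (o₀ : List (String × Int)) (o : PySem.Dict String Int)
    (h : ∀ r ∈ o₀.map Prod.fst, r ∉ a.values ∧ r ∉ s.map Prod.fst) :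
    s.foldl stepP (a, PySem.Dict.mk (o₀ ++ o.items)) =
      ((s.foldl stepP (a, o)).1, PySem.Dict.mk (o₀ ++ (s.foldl stepP (a, o)).2.items)) := by
  induction s generalizing a o with
  | nil => rfl
  | cons p rest ih =>
    obtain ⟨k2, v2⟩ := p
    cases hca : a.contains (stripD k2) with
    | true =>
      obtain ⟨rv, hrv⟩ : ∃ rv, a.get? (stripD k2) = some rv := by
        rw [PySem.Dict.contains_eq_isSome_get?] at hca
        exact Option.isSome_iff_exists.mp hca
      have hrvval : rv ∈ a.values :=
        List.mem_map_of_mem (f := Prod.snd) (PySem.Dict.mem_items_of_get?_eq_some a hrv)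
      have hrv0 : rv ∉ o₀.map Prod.fst := fun hm => (h rv hm).1 hrvval
      have hrep : a.getD (stripD k2) k2 = rv := PySem.Dict.getD_of_get?_eq_some a k2 hrv
      have hstep1 : stepP (a, PySem.Dict.mk (o₀ ++ o.items)) (k2, v2)
          = (a, PySem.Dict.mk (o₀ ++ (o.insert rv (o.getD rv 0 + v2)).items)) := by
        simp only [stepP, hca, if_true, hrep]
        rw [mk_append_getD o₀ o.items rv 0 hrv0, mk_append_insert o₀ o.items rv _ hrv0]
      have hstep2 : stepP (a, o) (k2, v2) = (a, o.insert rv (o.getD rv 0 + v2)) := by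
        simp only [stepP, hca, if_true, hrep]
      rw [List.foldl_cons, List.foldl_cons, hstep1, hstep2]
      exact ih _ _ (fun r hm => ⟨(h r hm).1, fun hk => (h r hm).2 (by simp [hk])⟩)
    | false =>
      have hk20 : k2 ∉ o₀.map Prod.fst := fun hm => (h k2 hm).2 (by simp)
      have hrep : (a.insert (stripD k2) k2).getD (stripD k2) k2 = k2 :=
        PySem.Dict.getD_insert_self a _ _ _
      have hstep1 : stepP (a, PySem.Dict.mk (o₀ ++ o.items)) (k2, v2)
          = (a.insert (stripD k2) k2,
             PySem.Dict.mk (o₀ ++ (o.insert k2 (o.getD k2 0 + v2)).items)) := by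
        simp only [stepP, hca, Bool.false_eq_true, if_false, hrep]
        rw [mk_append_getD o₀ o.items k2 0 hk20, mk_append_insert o₀ o.items k2 _ hk20]
      have hstep2 : stepP (a, o) (k2, v2)
          = (a.insert (stripD k2) k2, o.insert k2 (o.getD k2 0 + v2)) := by
        simp only [stepP, hca, Bool.false_eq_true, if_false, hrep]
      rw [List.foldl_cons, List.foldl_cons, hstep1, hstep2]
      refine ih _ _ (fun r hm => ⟨fun hv => ?_, fun hk => (h r hm).2 (by simp [hk])⟩)
      rcases PySem.Dict.mem_values_insert a _ _ _ hv with h1 | h2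
      · exact (h r hm).2 (by simp [h1])
      · exact (h r hm).1 h2

-- T: from the empty state, A's pair-level loop computes exactly mergeBuild.
theorem fold_eq_mergeBuild (n : Nat) (s : List (String × Int)) (hn : s.length ≤ n)
    (hnd : (s.map Prod.fst).Nodup) :
    (s.foldl stepP (PySem.Dict.empty, PySem.Dict.empty)).2.items = mergeBuild s := by
  induction n generalizing s with
  | zero =>
    rw [List.length_eq_zero_iff.mp (Nat.le_zero.mp hn)]
    simp [mergeBuild, PySem.Dict.empty]
  | succ n ih =>
    cases s with
    | nil => simp [mergeBuild, PySem.Dict.empty]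
    | cons p rest =>
      obtain ⟨k, v⟩ := p
      have hkrest : k ∉ rest.map Prod.fst := by
        simp only [List.map_cons, List.nodup_cons] at hnd
        exact hnd.1
      have hstep : stepP (PySem.Dict.empty, PySem.Dict.empty) (k, v)
          = (PySem.Dict.mk [(stripD k, k)], PySem.Dict.mk [(k, 0 + v)]) := by
        simp [stepP, PySem.Dict.empty, PySem.Dict.contains, PySem.Dict.insert,
          PySem.Dict.getD, PySem.Dict.get?]
      rw [List.foldl_cons, hstep]
      have habs := fold_absorb rest (PySem.Dict.mk [(stripD k, k)])
        (PySem.Dict.mk [(k, 0 + v)]) (stripD k) k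
        (by intro p hp; simp only [PySem.Dict.items] at hp
            rcases List.mem_singleton.mp hp with h; rw [h])
        (by simp [PySem.Dict.get?])
        (by simp [PySem.Dict.contains])
        (by simp [PySem.Dict.keys])
      rw [habs]
      have hins : (PySem.Dict.mk [(k, 0 + v)]).insert k
            ((PySem.Dict.mk [(k, 0 + v)]).getD k 0 + sameSum (stripD k) rest)
          = PySem.Dict.mk [(k, 0 + v + sameSum (stripD k) rest)] := by
        apply PySem.Dict.ext
        simp [PySem.Dict.insert, PySem.Dict.contains, PySem.Dict.getD, PySem.Dict.get?]
      rw [hins]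
      have hnofut : ∀ p ∈ filterOut (stripD k) rest, ¬(stripD p.1 = stripD k) := by
        intro p hp
        have := List.of_mem_filter hp
        simpa using this
      have hdrop := fold_drop_align (filterOut (stripD k) rest) PySem.Dict.empty
        (PySem.Dict.mk [(k, 0 + v + sameSum (stripD k) rest)]) (stripD k) k hnofut
      have h2 := congrArg Prod.snd hdrop
      simp only [] at h2
      rw [show PySem.Dict.mk [(stripD k, k)]
            = PySem.Dict.mk ((stripD k, k) :: (PySem.Dict.empty : PySem.Dict String String).items) from rfl,
          h2]
      have hpre := fold_out_prefix (filterOut (stripD k) rest) PySem.Dict.empty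
        [(k, 0 + v + sameSum (stripD k) rest)] PySem.Dict.empty
        (by intro r hr
            simp only [List.map_cons, List.map_nil, List.mem_singleton] at hr
            refine ⟨by simp [PySem.Dict.values, PySem.Dict.empty], fun hm => hkrest ?_⟩
            have hss : (filterOut (stripD k) rest).map Prod.fst ⊆ rest.map Prod.fst := by
              intro x hx
              rcases List.mem_map.mp hx with ⟨q, hq, hxq⟩
              exact hxq ▸ List.mem_map_of_mem (List.mem_of_mem_filter hq)
            exact hr ▸ hss hm)
      rw [show PySem.Dict.mk [(k, 0 + v + sameSum (stripD k) rest)]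
            = PySem.Dict.mk ([(k, 0 + v + sameSum (stripD k) rest)]
                ++ (PySem.Dict.empty : PySem.Dict String Int).items) from rfl,
          hpre]
      simp only [PySem.Dict.items, List.cons_append, List.nil_append]
      have hlen : (filterOut (stripD k) rest).length ≤ n := by
        have h1 : (filterOut (stripD k) rest).length ≤ rest.length :=
          List.length_filter_le _ _
        have h2 : rest.length ≤ n := by simpa using Nat.succ_le_succ_iff.mp (by simpa using hn)
        omega
      have hsub : ((filterOut (stripD k) rest).map Prod.fst).Sublist (rest.map Prod.fst) := by
        have hf : (filterOut (stripD k) rest).Sublist rest := by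
          simp only [filterOut]; exact List.filter_sublist (l := rest)
        exact hf.map Prod.fst
      have hndf : ((filterOut (stripD k) rest).map Prod.fst).Nodup :=
        (by simp only [List.map_cons, List.nodup_cons] at hnd; exact hnd.2 : (rest.map Prod.fst).Nodup).sublist hsub
      rw [ih (filterOut (stripD k) rest) hlen hndf]
      show _ = mergeBuild ((k, v) :: rest)
      rw [mergeBuild, zero_add]

-- bridge: A's keys-based loop is the pair-level loop on the value-sorted items.
theorem merge_parts_eq_fold (middles : List (String × Int))
    (hnd : (middles.map Prod.fst).Nodup) :
    merge_parts middles =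
      ((PySem.List.sorted middles (fun p => p.2)).foldl stepP
        (PySem.Dict.empty, PySem.Dict.empty)).2.items := by
  simp only [merge_parts]
  have hndk : (PySem.Dict.mk middles).keys.Nodup := by
    simpa [PySem.Dict.keys] using hnd
  have hkeys : (PySem.Dict.mk middles).keys = middles.map Prod.fst := rfl
  have hgetD : ∀ p ∈ middles, (PySem.Dict.mk middles).getD p.1 0 = p.2 := by
    intro p hp
    exact PySem.Dict.getD_of_mem_items (PySem.Dict.mk middles) (by simpa using hp) hndk 0
  have hsort : PySem.List.sorted ((PySem.Dict.mk middles).keys)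
        (fun x => (PySem.Dict.mk middles).getD x 0)
      = (PySem.List.sorted middles (fun p => p.2)).map Prod.fst := by
    rw [hkeys]
    exact sorted_map_congr middles Prod.fst _ _ hgetD
  rw [hsort, List.foldl_map]
  rw [PySem.List.foldl_congr_mem _ _ stepP _ ?_]
  intro acc p hp
  have hpm : p ∈ middles := (PySem.List.mem_sorted middles _ false p).mp hp
  obtain ⟨x, y⟩ := p
  simp only [stepP, stripD]
  rw [hgetD (x, y) hpm]

-- ===== VERDICT (by name: the statement is the Claim_ definition above) =====
theorem merge_parts_spec : Claim_equal_merge_parts := by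
  intro middles _hdom hpre
  unfold Spec_merge_parts merge_parts_alt
  rw [merge_parts_eq_fold middles hpre]
  refine fold_eq_mergeBuild (PySem.List.sorted middles (fun p => p.2)).length _ le_rfl ?_
  exact ((PySem.List.sorted_perm middles (fun p => p.2) false).map Prod.fst).nodup_iff.mpr hpre
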